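-- pv_equiv track=rewrite | github.com/AHDCraftsilicon/RegTech | ocr_reading_files/addhar_ocr_without_load.py | string_to_get_Only_person_name
-- ===== SOURCE A (Python) =====
-- def string_to_get_personname_list(aadhaar_string, keyword_values,keyword):
--     lines = aadhaar_string.split('\n')
--
--     get_person_name = ""
--     if keyword == "DOB":
--         for i in range(len(lines)):
--             if str(keyword_values) in lines[i]:
--                 if i >= 1:
--                     get_person_name = lines[i - 1]
--                     break
--     elif keyword == "Gender":
--         for i in range(len(lines)):
--             if str(keyword_values) in lines[i]:
--                 if i >= 2:
--                     get_person_name = lines[i - 2]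
--                     break
--
--     return get_person_name
--
-- def string_to_get_Only_person_name(normal_string,english_string,all_lan_string,dob_key_word,gender_keyword):
--     simple_name = ""
--     if dob_key_word !=  "Unknown":
--
--         remove_blank_line = "\n".join(line for line in english_string.split('\n') if line.strip())
--
--         get_name_english_String = string_to_get_personname_list(remove_blank_line,dob_key_word,"DOB")
--         if get_name_english_String == "":
--             get_name_normal_string = string_to_get_personname_list(normal_string,dob_key_word,"DOB")
--             simple_name = get_name_normal_string
--         else:
--             simple_name = get_name_english_String
--
--         if simple_name == "":
--             get_name_all_lan_string = string_to_get_personname_list(all_lan_string,dob_key_word,"DOB")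
--             simple_name = get_name_all_lan_string
--
--     if simple_name == "":
--         if gender_keyword != "Unknown":
--             remove_blank_line = "\n".join(line for line in english_string.split('\n') if line.strip())
--             get_name_english_String = string_to_get_personname_list(remove_blank_line,gender_keyword,"Gender")
--
--             if get_name_english_String == "":
--                 get_name_normal_string = string_to_get_personname_list(normal_string,gender_keyword,"Gender")
--                 simple_name = get_name_normal_string
--             else:
--                 simple_name = get_name_english_String
--
--             if simple_name == "":
--                 get_name_all_lan_string = string_to_get_personname_list(all_lan_string,gender_keyword,"Gender")
--                 simple_name = get_name_all_lan_string
--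
--     return simple_name
-- ===== SOURCE B (Python) =====
-- def extract(text, keyword, offset):
--     # single pass keeping a sliding window of the previous `offset` lines;
--     # when a line contains the keyword and the window is full, its oldest
--     # entry is exactly the line `offset` above the match
--     window = []
--     for line in text.split('\n'):
--         if keyword in line and len(window) == offset:
--             return window[0]
--         window.append(line)
--         if len(window) > offset:
--             window.pop(0)
--     return ''
--
-- def string_to_get_Only_person_name(normal_string, english_string, all_lan_string, dob_key_word, gender_keyword):
--     candidates = [
--         '\n'.join(line for line in english_string.split('\n') if line.strip()),
--         normal_string,
--         all_lan_string,
--     ]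
--     name = ''
--     for keyword, offset in ((dob_key_word, 1), (gender_keyword, 2)):
--         if not name and keyword != 'Unknown':
--             name = next((r for r in (extract(c, keyword, offset) for c in candidates) if r), '')
--     return name
-- ===== Notes on version B (the rewrite author's own statement) =====
-- stated objective: simpler
-- what changed: Replaces A's duplicated DOB/Gender if/else cascades and the two index-arithmetic loops (range(len), lines[i-1]/lines[i-2] with break) by one single-pass extract that maintains a sliding window of the previous `offset` lines (no indexing at all) plus a data-driven first-non-empty pass over the ordered candidate texts.
import Mathlib
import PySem

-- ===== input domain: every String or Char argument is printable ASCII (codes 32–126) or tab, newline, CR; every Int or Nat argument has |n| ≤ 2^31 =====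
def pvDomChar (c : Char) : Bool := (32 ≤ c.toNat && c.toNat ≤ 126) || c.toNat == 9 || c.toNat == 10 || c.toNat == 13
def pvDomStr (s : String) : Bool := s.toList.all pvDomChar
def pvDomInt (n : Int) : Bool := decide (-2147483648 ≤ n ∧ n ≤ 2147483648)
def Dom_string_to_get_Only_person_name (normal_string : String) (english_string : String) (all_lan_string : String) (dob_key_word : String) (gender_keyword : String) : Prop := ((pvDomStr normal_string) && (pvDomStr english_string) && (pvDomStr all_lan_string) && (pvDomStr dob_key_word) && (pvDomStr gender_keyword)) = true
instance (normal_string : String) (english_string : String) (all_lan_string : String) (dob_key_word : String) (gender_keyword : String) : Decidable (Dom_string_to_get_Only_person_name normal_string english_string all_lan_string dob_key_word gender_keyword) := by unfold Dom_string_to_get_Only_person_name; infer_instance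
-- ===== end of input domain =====

-- B replaces A's duplicated index-arithmetic keyword loops by a single-pass sliding-window
-- scan (a queue of the previous `offset` lines, no indexing) and a data-driven
-- first-non-empty pass over the ordered candidate texts (objective: simpler).


-- ===== PORT A =====
-- for-loop with break of string_to_get_personname_list, keyword == "DOB" branch (offset 1)
def pvLoopDOB (lines : List String) (kw : String) (i : Nat) : String :=
  if h : i < lines.length then
    if PySem.Str.isIn kw lines[i] then
      if 1 ≤ i then lines[i-1]'(by omega)
      else pvLoopDOB lines kw (i+1)
    else pvLoopDOB lines kw (i+1)
  else ""
termination_by lines.length - i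

-- the keyword == "Gender" branch (offset 2)
def pvLoopGender (lines : List String) (kw : String) (i : Nat) : String :=
  if h : i < lines.length then
    if PySem.Str.isIn kw lines[i] then
      if 2 ≤ i then lines[i-2]'(by omega)
      else pvLoopGender lines kw (i+1)
    else pvLoopGender lines kw (i+1)
  else ""
termination_by lines.length - i

def string_to_get_personname_list (aadhaar_string : String) (keyword_values : String) (keyword : String) : String :=
  let lines := (PySem.Str.split? aadhaar_string "\n").getD []  -- sep "\n" is non-empty, so split? is always some
  if keyword = "DOB" then pvLoopDOB lines keyword_values 0
  else if keyword = "Gender" then pvLoopGender lines keyword_values 0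
  else ""

def string_to_get_Only_person_name (normal_string : String) (english_string : String) (all_lan_string : String) (dob_key_word : String) (gender_keyword : String) : String :=
  let simple_name :=
    if dob_key_word ≠ "Unknown" then
      let remove_blank_line := PySem.Str.join "\n" (((PySem.Str.split? english_string "\n").getD []).filter (fun line => PySem.Str.strip line != ""))
      let get_name_english_String := string_to_get_personname_list remove_blank_line dob_key_word "DOB"
      let simple_name :=
        if get_name_english_String = "" then string_to_get_personname_list normal_string dob_key_word "DOB"
        else get_name_english_String
      if simple_name = "" then string_to_get_personname_list all_lan_string dob_key_word "DOB"
      else simple_name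
    else ""
  if simple_name = "" then
    if gender_keyword ≠ "Unknown" then
      let remove_blank_line := PySem.Str.join "\n" (((PySem.Str.split? english_string "\n").getD []).filter (fun line => PySem.Str.strip line != ""))
      let get_name_english_String := string_to_get_personname_list remove_blank_line gender_keyword "Gender"
      let simple_name :=
        if get_name_english_String = "" then string_to_get_personname_list normal_string gender_keyword "Gender"
        else get_name_english_String
      if simple_name = "" then string_to_get_personname_list all_lan_string gender_keyword "Gender"
      else simple_name
    else ""
  else simple_name

-- ===== PORT B =====
-- the for-loop of extract: a sliding window of the previous `off` lines; window[0] is only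
-- read under `window.length = off` with off ∈ {1,2}, so the window is non-empty and headD is exact
def pvWinGo (kw : String) (off : Nat) (window : List String) : List String → String
  | [] => ""
  | line :: rest =>
      if PySem.Str.isIn kw line && decide (window.length = off) then window.headD ""
      else
        let w := window ++ [line]
        pvWinGo kw off (if decide (off < w.length) then w.drop 1 else w) rest

def pvExtract (text : String) (kw : String) (off : Nat) : String :=
  pvWinGo kw off [] ((PySem.Str.split? text "\n").getD [])  -- sep "\n" non-empty, split? always some

-- next((r for r in (extract(c, kw, off) for c in candidates) if r), '')
def pvFirstHit (candidates : List String) (kw : String) (off : Nat) : String :=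
  match candidates with
  | [] => ""
  | c :: rest =>
      let r := pvExtract c kw off
      if r ≠ "" then r else pvFirstHit rest kw off

def string_to_get_Only_person_name_alt (normal_string : String) (english_string : String) (all_lan_string : String) (dob_key_word : String) (gender_keyword : String) : String :=
  let candidates :=
    [PySem.Str.join "\n" (((PySem.Str.split? english_string "\n").getD []).filter (fun line => PySem.Str.strip line != "")),
     normal_string, all_lan_string]
  ([(dob_key_word, (1 : Nat)), (gender_keyword, 2)]).foldl
    (fun name p => if name = "" ∧ p.1 ≠ "Unknown" then pvFirstHit candidates p.1 p.2 else name) ""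

-- ===== PRECONDITION & SPEC =====
def Spec_string_to_get_Only_person_name (normal_string : String) (english_string : String) (all_lan_string : String) (dob_key_word : String) (gender_keyword : String) (out : String) : Prop := out = string_to_get_Only_person_name_alt normal_string english_string all_lan_string dob_key_word gender_keyword
instance (normal_string : String) (english_string : String) (all_lan_string : String) (dob_key_word : String) (gender_keyword : String) (out : String) : Decidable (Spec_string_to_get_Only_person_name normal_string english_string all_lan_string dob_key_word gender_keyword out) := by unfold Spec_string_to_get_Only_person_name; infer_instance

-- ===== CLAIM (what is proved, stated in full; the proofs are below) =====
def Claim_equal_string_to_get_Only_person_name : Prop := ∀ (normal_string : String) (english_string : String) (all_lan_string : String) (dob_key_word : String) (gender_keyword : String), Dom_string_to_get_Only_person_name normal_string english_string all_lan_string dob_key_word gender_keyword → Spec_string_to_get_Only_person_name normal_string english_string all_lan_string dob_key_word gender_keyword (string_to_get_Only_person_name normal_string english_string all_lan_string dob_key_word gender_keyword)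

-- ===== LEMMAS AND PROOFS =====
-- common index-based characterisation both loops are reduced to
def genLoop (lines : List String) (kw : String) (off : Nat) (i : Nat) : String :=
  if h : i < lines.length then
    if PySem.Str.isIn kw lines[i] && decide (off ≤ i) then lines.getD (i - off) ""
    else genLoop lines kw off (i+1)
  else ""
termination_by lines.length - i

lemma loopDOB_eq_gen (lines : List String) (kw : String) : ∀ i, pvLoopDOB lines kw i = genLoop lines kw 1 i := by
  intro i
  induction hn : lines.length - i using Nat.strong_induction_on generalizing i with
  | _ n ih =>
    rw [pvLoopDOB, genLoop]
    by_cases h : i < lines.length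
    · simp only [h, dif_pos]
      by_cases hin : PySem.Str.isIn kw lines[i]
      all_goals rw [PySem.Str.isIn_eq] at hin
      · by_cases hi : 1 ≤ i
        · simp [hin, hi, List.getD, List.getElem?_eq_getElem (show i - 1 < lines.length by omega)]
        · simp [hin, hi, ih (lines.length - (i+1)) (by omega) (i+1) rfl]
      · simp [hin, ih (lines.length - (i+1)) (by omega) (i+1) rfl]
    · simp [h]

lemma loopGender_eq_gen (lines : List String) (kw : String) : ∀ i, pvLoopGender lines kw i = genLoop lines kw 2 i := by
  intro i
  induction hn : lines.length - i using Nat.strong_induction_on generalizing i with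
  | _ n ih =>
    rw [pvLoopGender, genLoop]
    by_cases h : i < lines.length
    · simp only [h, dif_pos]
      by_cases hin : PySem.Str.isIn kw lines[i]
      all_goals rw [PySem.Str.isIn_eq] at hin
      · by_cases hi : 2 ≤ i
        · simp [hin, hi, List.getD, List.getElem?_eq_getElem (show i - 2 < lines.length by omega)]
        · simp [hin, hi, ih (lines.length - (i+1)) (by omega) (i+1) rfl]
      · simp [hin, ih (lines.length - (i+1)) (by omega) (i+1) rfl]
    · simp [h]

lemma winGo_eq_gen (lines : List String) (kw : String) (off : Nat) (hoff : 1 ≤ off) :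
    ∀ i, i ≤ lines.length →
      pvWinGo kw off ((lines.take i).drop (i - off)) (lines.drop i) = genLoop lines kw off i := by
  intro i
  induction hn : lines.length - i using Nat.strong_induction_on generalizing i with
  | _ n ih =>
    intro hile
    rw [genLoop]
    by_cases h : i < lines.length
    · rw [List.drop_eq_getElem_cons h, pvWinGo]
      have hwlen : ((lines.take i).drop (i - off)).length = min i off := by
        simp only [List.length_drop, List.length_take]; omega
      have hwin : (lines.take i).drop (i - off) ++ [lines[i]] = (lines.take (i+1)).drop (i - off) := by
        rw [List.take_add_one, List.getElem?_eq_getElem h]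
        rw [List.drop_append_of_le_length (by simp only [List.length_take]; omega)]
        rfl
      have hrec : pvWinGo kw off ((lines.take (i+1)).drop (i+1-off)) (lines.drop (i+1)) = genLoop lines kw off (i+1) :=
        ih (lines.length - (i+1)) (by omega) (i+1) rfl (by omega)
      have hstep : (if decide (off < ((lines.take i).drop (i - off) ++ [lines[i]]).length) = true
             then ((lines.take i).drop (i - off) ++ [lines[i]]).drop 1
             else ((lines.take i).drop (i - off) ++ [lines[i]])) = (lines.take (i+1)).drop (i+1-off) := by
        have hlw : ((lines.take i).drop (i - off) ++ [lines[i]]).length = min i off + 1 := by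
          simp only [List.length_append, List.length_cons, List.length_nil, hwlen]
        by_cases hi : off ≤ i
        · rw [if_pos (by simp only [hlw, decide_eq_true_eq]; omega), hwin, List.drop_drop]
          congr 1; omega
        · rw [if_neg (by simp only [hlw, decide_eq_true_eq]; omega), hwin]
          congr 1; omega
      simp only [h, dif_pos]
      by_cases hin : PySem.Str.isIn kw lines[i]
      · by_cases hi : off ≤ i
        · have hlt : i - off < lines.length := by omega
          have hhead : ((lines.take i).drop (i - off)).headD "" = lines.getD (i - off) "" := by
            rw [List.drop_take, List.drop_eq_getElem_cons hlt,
                show i - (i - off) = (i - (i - off) - 1) + 1 from by omega,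
                List.take_succ_cons, List.headD_cons]
            simp only [List.getD, List.getElem?_eq_getElem hlt, Option.getD_some]
          rw [if_pos (show (PySem.Str.isIn kw lines[i] && decide (((lines.take i).drop (i - off)).length = off)) = true from by
                simp only [hin, hwlen, Bool.true_and, decide_eq_true_eq]; omega),
              if_pos (show (PySem.Str.isIn kw lines[i] && decide (off ≤ i)) = true from by
                simp only [hin, Bool.true_and, decide_eq_true_eq]; exact hi),
              hhead]
        · rw [if_neg (show ¬ (PySem.Str.isIn kw lines[i] && decide (((lines.take i).drop (i - off)).length = off)) = true from by
                simp only [hin, hwlen, Bool.true_and, decide_eq_true_eq]; omega),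
              if_neg (show ¬ (PySem.Str.isIn kw lines[i] && decide (off ≤ i)) = true from by
                simp only [hin, Bool.true_and, decide_eq_true_eq]; omega)]
          rw [hstep]
          exact hrec
      · rw [if_neg (show ¬ (PySem.Str.isIn kw lines[i] && decide (((lines.take i).drop (i - off)).length = off)) = true from by
              simp only [Bool.and_eq_true]; rintro ⟨h1, -⟩; exact hin h1),
            if_neg (show ¬ (PySem.Str.isIn kw lines[i] && decide (off ≤ i)) = true from by
              simp only [Bool.and_eq_true]; rintro ⟨h1, -⟩; exact hin h1)]
        rw [hstep]
        exact hrec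
    · have : i = lines.length := by omega
      subst this
      simp only [List.drop_length]
      rw [pvWinGo]
      simp

lemma extract_eq_gen (s kw : String) (off : Nat) (hoff : 1 ≤ off) :
    pvExtract s kw off = genLoop ((PySem.Str.split? s "\n").getD []) kw off 0 := by
  have := winGo_eq_gen ((PySem.Str.split? s "\n").getD []) kw off hoff 0 (by omega)
  simpa [pvExtract] using this

lemma personname_dob (s kw : String) : string_to_get_personname_list s kw "DOB" = pvExtract s kw 1 := by
  simp [string_to_get_personname_list, extract_eq_gen s kw 1 (by omega), loopDOB_eq_gen]

lemma personname_gender (s kw : String) : string_to_get_personname_list s kw "Gender" = pvExtract s kw 2 := by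
  simp [string_to_get_personname_list, extract_eq_gen s kw 2 (by omega), loopGender_eq_gen]

-- ===== VERDICT (by name: the statement is the Claim_ definition above) =====
theorem string_to_get_Only_person_name_spec : Claim_equal_string_to_get_Only_person_name := by
  intro n e a dob g _
  unfold Spec_string_to_get_Only_person_name
  unfold string_to_get_Only_person_name string_to_get_Only_person_name_alt
  simp only [List.foldl, pvFirstHit, personname_dob, personname_gender]
  by_cases hd : dob = "Unknown" <;> by_cases hg : g = "Unknown" <;>
    simp only [hd, hg, ne_eq, not_true_eq_false, not_false_eq_true, and_true, and_false,
      if_true, if_false] <;>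
  · split_ifs <;> simp_all
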